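-- pv_equiv track=rewrite | github.com/majstenmark/kattis | periodicstrings.py | check
-- ===== SOURCE A (Python) =====
-- def check(S, length):
--     s = S[:length]
--     for i in range(length, len(S), length):
--         alt = S[i:i + length]
--         s = s[-1] + s[0:length-1]
--         if alt != s:
--             return False
--     return True
-- ===== SOURCE B (Python) =====
-- def check(S, length):
--     # Compare each block against a closed-form right-rotation of the first
--     # block (rotate by (block index) mod length), instead of maintaining a
--     # rotating string across iterations.
--     first = S[:length]
--     return all(
--         S[i:i + length]
--         == first[length - (i // length) % length:] + first[:length - (i // length) % length]
--         for i in range(length, len(S), length)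
--     )
-- ===== Notes on version B (the rewrite author's own statement) =====
-- stated objective: alternative
-- what changed: Replaces the stateful loop that carries a rotating string with early return by a single all() over blocks, comparing each block against a closed-form rotation of the first block computed from the block index.
import Mathlib
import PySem

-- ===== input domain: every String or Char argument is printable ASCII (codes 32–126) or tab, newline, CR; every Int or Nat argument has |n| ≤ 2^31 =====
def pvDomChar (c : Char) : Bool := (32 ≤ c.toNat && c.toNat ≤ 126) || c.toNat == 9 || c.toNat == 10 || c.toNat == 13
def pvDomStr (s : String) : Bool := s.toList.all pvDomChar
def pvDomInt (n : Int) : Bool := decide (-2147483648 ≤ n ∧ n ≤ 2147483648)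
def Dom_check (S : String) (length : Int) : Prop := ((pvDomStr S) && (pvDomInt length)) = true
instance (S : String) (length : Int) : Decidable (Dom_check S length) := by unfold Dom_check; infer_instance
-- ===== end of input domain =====

-- B replaces A's stateful rotate-and-compare loop (with early return) by one
-- pass that compares each block against a closed-form rotation of the first
-- block computed from the block index (objective: alternative).


-- ===== PORT A =====
-- loop of A: for i in range(length, len(S), length): alt = S[i:i+length];
-- s = s[-1] + s[0:length-1]; if alt != s: return False.  s[-1] is ported with
-- pyGetD (default ' '): under Pre_check, whenever the loop body runs s is a
-- nonempty string, so the IndexError branch is unreachable and the default is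
-- never used.
def checkLoopA (cs : List Char) (length : Int) : List Int → List Char → Bool
  | [], _ => true
  | i :: rest, s =>
    let alt := PySem.List.slice cs (some i) (some (i + length))
    let s' := PySem.List.pyGetD s (-1) ' ' :: PySem.List.slice s (some 0) (some (length - 1))
    if alt ≠ s' then false else checkLoopA cs length rest s'

def check (S : String) (length : Int) : Bool :=
  let cs := S.toList
  let s := PySem.List.slice cs none (some length)
  checkLoopA cs length (PySem.List.pyRange length (cs.length : Int) length) s

-- ===== PORT B =====
def check_alt (S : String) (length : Int) : Bool :=
  let cs := S.toList
  let first := PySem.List.slice cs none (some length)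
  (PySem.List.pyRange length (cs.length : Int) length).all (fun i =>
    let m := PySem.Int.mod (PySem.Int.floordiv i length) length
    PySem.List.slice cs (some i) (some (i + length))
      == PySem.List.slice first (some (length - m)) none
          ++ PySem.List.slice first (some 0) (some (length - m)))

-- ===== PRECONDITION & SPEC =====
-- Python A raises ValueError (range() with step 0) exactly when length == 0; B raises there too.
def Pre_check (S : String) (length : Int) : Prop := length ≠ 0
instance (S : String) (length : Int) : Decidable (Pre_check S length) := by unfold Pre_check; infer_instance
def pvWitness_check : String × Int := ("abcabc", 3)

def Spec_check (S : String) (length : Int) (out : Bool) : Prop := out = check_alt S length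
instance (S : String) (length : Int) (out : Bool) : Decidable (Spec_check S length out) := by unfold Spec_check; infer_instance

-- ===== CLAIM (what is proved, stated in full; the proofs are below) =====
def Claim_equal_check : Prop := ∀ (S : String) (length : Int), Dom_check S length → Pre_check S length → Spec_check S length (check S length)

-- ===== LEMMAS AND PROOFS =====

-- closed-form right rotation by m of a list f (used with m < f.length)
def closedRot (m : Nat) (f : List Char) : List Char :=
  f.drop (f.length - m) ++ f.take (f.length - m)

theorem closedRot_zero (f : List Char) : closedRot 0 f = f := by
  simp [closedRot]

-- one right rotation (A's loop-body update of s) advances the closed form by one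
theorem rotOnce_closedRot (L : Nat) (length : Int) (f : List Char)
    (hf : f.length = L) (hL : (length : Int) = (L : Int)) (hL1 : 1 ≤ L) (m : Nat) (hm : m < L) :
    (PySem.List.pyGetD (closedRot m f) (-1) ' ' ::
      PySem.List.slice (closedRot m f) (some 0) (some (length - 1)))
      = closedRot ((m + 1) % L) f := by
  have hx : (closedRot m f).length = L := by simp [closedRot]; omega
  have hxne : closedRot m f ≠ [] := by
    intro h; rw [h] at hx; simp at hx; omega
  rw [PySem.List.pyGetD_neg_one _ _ hxne]
  have h1 : length - 1 = ((L - 1 : Nat) : Int) := by omega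
  rw [h1, PySem.List.slice_zero_start, PySem.List.slice_to_natCast]
  have hidx : L - 1 - m < f.length := by omega
  have hlast : (closedRot m f).getLast hxne = f[L - 1 - m] := by
    rw [List.getLast_eq_getElem]
    simp only [closedRot, hf]
    rw [List.getElem_append_right (by simp; omega)]
    simp [hf]
    congr 1
    omega
  have htake : (closedRot m f).take (L - 1)
      = f.drop (f.length - m) ++ f.take (L - 1 - m) := by
    simp only [closedRot]
    rw [List.take_append]
    congr 1
    · exact List.take_of_length_le (by simp [hf]; omega)
    · rw [List.take_take]
      congr 1
      simp [hf]; omega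
  rw [hlast, htake]
  by_cases hcase : m + 1 < L
  · rw [Nat.mod_eq_of_lt hcase]
    simp only [closedRot, hf]
    rw [show L - (m+1) = L - 1 - m from by omega, ← List.getElem_cons_drop (h := hidx),
        show L - 1 - m + 1 = L - m from by omega]
    simp
  · have hmeq : m + 1 = L := by omega
    rw [hmeq, Nat.mod_self]
    simp only [closedRot, hf]
    have e1 : L - 1 - m = 0 := by omega
    have e2 : L - m = 1 := by omega
    have d1 : List.drop L f = [] := List.drop_of_length_le (by omega)
    have t1 : List.take L f = f := List.take_of_length_le (by omega)
    simp only [e1, e2, Nat.sub_zero, List.take_zero, List.append_nil, d1, t1, List.nil_append]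
    have h0 := List.getElem_cons_drop (as := f) (i := 0) (h := show 0 < f.length by omega)
    simpa using h0

-- the loop of A over blocks k, k+1, … with state closedRot ((k-1) % L) first
-- equals B's all over the same indices
theorem loop_eq_all (cs first : List Char) (length : Int) (L : Nat)
    (hL : length = (L : Int)) (hL1 : 1 ≤ L) (hf : first.length = L) :
    ∀ (m k : Nat), 1 ≤ k →
      checkLoopA cs length ((List.range m).map (fun j => ((k + j : Nat) : Int) * length))
          (closedRot ((k - 1) % L) first)
        = ((List.range m).map (fun j => ((k + j : Nat) : Int) * length)).all
            (fun i =>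
              PySem.List.slice cs (some i) (some (i + length))
                == PySem.List.slice first
                    (some (length - PySem.Int.mod (PySem.Int.floordiv i length) length)) none
                  ++ PySem.List.slice first (some 0)
                    (some (length - PySem.Int.mod (PySem.Int.floordiv i length) length))) := by
  intro m
  induction m with
  | zero => intro k hk; simp [checkLoopA]
  | succ m ih =>
    intro k hk
    rw [List.range_succ_eq_map, List.map_cons, List.map_map]
    have hmapeq : ((List.range m).map ((fun j => ((k + j : Nat) : Int) * length) ∘ (· + 1)))
        = (List.range m).map (fun j => (((k + 1) + j : Nat) : Int) * length) := by
      apply List.map_congr_left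
      intro j _
      simp only [Function.comp]
      congr 2
      omega
    rw [hmapeq]
    have hpos : (0 : Int) < length := by rw [hL]; exact_mod_cast hL1
    have hfd : PySem.Int.floordiv ((k : Int) * length) length = ((k : Nat) : Int) := by
      rw [PySem.Int.floordiv_eq_ediv_of_pos hpos]
      simp [Int.mul_ediv_cancel _ (by omega : length ≠ 0)]
    have hmod : PySem.Int.mod ((k : Int)) length = ((k % L : Nat) : Int) := by
      rw [PySem.Int.mod_eq_emod_of_pos hpos, hL]
      push_cast
      ring
    have hsub : length - ((k % L : Nat) : Int) = ((L - k % L : Nat) : Int) := by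
      have : k % L < L := Nat.mod_lt _ (by omega)
      omega
    have hrotB : PySem.List.slice first (some (length - ((k % L : Nat) : Int))) none
          ++ PySem.List.slice first (some 0) (some (length - ((k % L : Nat) : Int)))
        = closedRot (k % L) first := by
      rw [hsub, PySem.List.slice_from_natCast, PySem.List.slice_zero_start,
        PySem.List.slice_to_natCast, closedRot, hf]
    have hmlt : (k - 1) % L < L := Nat.mod_lt _ (by omega)
    have hrotA : (PySem.List.pyGetD (closedRot ((k - 1) % L) first) (-1) ' ' ::
          PySem.List.slice (closedRot ((k - 1) % L) first) (some 0) (some (length - 1)))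
        = closedRot (k % L) first := by
      rw [rotOnce_closedRot L length first hf hL hL1 _ hmlt]
      congr 1
      rw [Nat.mod_add_mod]
      congr 1
      omega
    simp only [checkLoopA, List.all_cons, Nat.add_zero]
    rw [hfd, hmod, hrotB, hrotA]
    by_cases heq : PySem.List.slice cs (some ((k : Int) * length))
        (some (((k : Int) * length) + length)) = closedRot (k % L) first
    · rw [if_neg (not_not_intro heq), heq]
      simp only [beq_self_eq_true, Bool.true_and]
      have h2 := ih (k + 1) (by omega)
      simp only [Nat.add_sub_cancel] at h2
      exact h2
    · rw [if_pos heq]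
      have hb : (PySem.List.slice cs (some ((k : Int) * length))
          (some (((k : Int) * length) + length)) == closedRot (k % L) first) = false := by
        simp [heq]
      rw [hb, Bool.false_and]

theorem check_eq (S : String) (length : Int) (hpre : length ≠ 0) :
    check S length = check_alt S length := by
  simp only [check, check_alt]
  set cs := S.toList with hcs
  rcases lt_trichotomy length 0 with hneg | hz | hpos
  · have hempty : PySem.List.pyRange length (cs.length : Int) length = [] := by
      rw [PySem.List.pyRange_of_neg _ _ hneg, if_neg (by omega), List.range_zero, List.map_nil]
    rw [hempty]
    simp [checkLoopA]
  · exact absurd hz hpre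
  · have hL : length = ((length.toNat : Nat) : Int) := (Int.toNat_of_nonneg (by omega)).symm
    set L := length.toNat with hLdef
    have hL1 : 1 ≤ L := by omega
    by_cases hlt : length < (cs.length : Int)
    · have hcnt : PySem.List.pyRange length (cs.length : Int) length
          = (List.range (((cs.length : Int) - length + length - 1) / length).toNat).map
              (fun j => ((1 + j : Nat) : Int) * length) := by
        rw [PySem.List.pyRange_of_pos _ _ hpos, if_pos hlt]
        apply List.map_congr_left
        intro j _
        push_cast
        ring
      rw [hcnt]
      have hfirst : PySem.List.slice cs none (some length) = cs.take L := by
        rw [PySem.List.slice_to cs ((by omega : (0:Int) ≤ length))]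
      have hf : (PySem.List.slice cs none (some length)).length = L := by
        rw [hfirst, List.length_take]
        omega
      have hinit := loop_eq_all cs (PySem.List.slice cs none (some length)) length L hL hL1 hf
        (((cs.length : Int) - length + length - 1) / length).toNat 1 (by omega)
      rw [show (1 - 1) % L = 0 from by simp, closedRot_zero] at hinit
      exact hinit
    · have hempty : PySem.List.pyRange length (cs.length : Int) length = [] := by
        rw [PySem.List.pyRange_of_pos _ _ hpos, if_neg hlt, List.range_zero, List.map_nil]
      rw [hempty]
      simp [checkLoopA]

-- ===== VERDICT (by name: the statement is the Claim_ definition above) =====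
theorem check_spec : Claim_equal_check := by
  intro S length _ hpre
  exact check_eq S length hpre
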